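-- pv_equiv track=rewrite | github.com/jinhyeok15/python-examples | BOJ/계단오르기_2579.py | bfs
-- ===== SOURCE A (Python) =====
-- class LookUp:
--     def __init__(self,
--         current: int,
--         score: int,
--         accum: int,
--         strike: int
--     ):
--         self.current = current
--         self.score = score
--         self.accum = accum
--         self.strike = strike
--
-- def bfs(start, stairs):
--     q = []
--     q.append(LookUp(start, stairs[start], stairs[start], 1))
--
--     max_score = 0
--
--     while q:
--         lookup: LookUp = q.pop(0)
--
--         if lookup.current == len(stairs)-1:
--             max_score = max([lookup.accum, max_score])
--             continue
--
--         plans = next_plans(lookup, stairs)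
--         for plan in plans:
--             q.append(plan)
--
--     return max_score
--
-- def next_plans(lookup: LookUp, stairs):
--     plans = []
--
--     top = len(stairs)-1
--     if lookup.current == top:
--         return plans
--
--     if lookup.strike + 1 != 3:
--         idx = lookup.current + 1
--         plans.append(
--             LookUp(idx, stairs[idx], lookup.accum + stairs[idx], lookup.strike + 1)
--         )
--
--     if lookup.current + 2 > top:
--         return plans
--
--     idx = lookup.current + 2
--     plans.append(
--         LookUp(idx, stairs[idx], lookup.accum + stairs[idx], 1)
--     )
--
--     return plans
-- ===== SOURCE B (Python) =====
-- # Forward DP over positions start..top, tracking the best path sum by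
-- # consecutive-step state (strike 1 or 2), instead of A's BFS enumeration
-- # of all paths.
--
-- def _omax(a, b):
--     if a is None:
--         return b
--     if b is None:
--         return a
--     return max(a, b)
--
--
-- def bfs(start, stairs):
--     top = len(stairs) - 1
--     pp = None                     # (best@i-2 strike1, best@i-2 strike2), None before start+1-th step
--     p = (stairs[start], None)     # (best@i strike1, best@i strike2), starting at i = start
--     for i in range(start + 1, top + 1):
--         v = stairs[i]
--         via2 = None               # arrive at i by a +2 step from i-2 (strike resets to 1)
--         if pp is not None:
--             m = _omax(pp[0], pp[1])
--             if m is not None: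
--                 via2 = m + v
--         via1 = None               # arrive at i by a +1 step (only from strike 1)
--         if p[0] is not None:
--             via1 = p[0] + v
--         pp, p = p, (via2, via1)
--     best = _omax(p[0], p[1])
--     return 0 if best is None else max(0, best)
-- ===== Notes on version B (the rewrite author's own statement) =====
-- stated objective: alternative
-- what changed: A enumerates every legal path with a breadth-first queue of path states; B does one forward dynamic-programming pass over positions, keeping only the best path sum per (position, consecutive-step) state.
import Mathlib
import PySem

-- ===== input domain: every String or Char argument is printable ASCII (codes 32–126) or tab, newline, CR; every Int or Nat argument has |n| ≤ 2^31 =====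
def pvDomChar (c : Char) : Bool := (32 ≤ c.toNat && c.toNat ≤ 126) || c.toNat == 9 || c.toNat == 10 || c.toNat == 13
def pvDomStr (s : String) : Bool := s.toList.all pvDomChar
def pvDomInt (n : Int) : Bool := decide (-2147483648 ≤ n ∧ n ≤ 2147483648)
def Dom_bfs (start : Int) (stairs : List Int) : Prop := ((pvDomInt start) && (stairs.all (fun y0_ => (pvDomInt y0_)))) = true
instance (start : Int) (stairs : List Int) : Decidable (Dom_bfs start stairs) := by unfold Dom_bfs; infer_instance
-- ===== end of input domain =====

-- B replaces A's breadth-first enumeration of stair paths by a single forward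
-- dynamic-programming pass over positions (objective: alternative).

-- stairs[i] with Python semantics; Pre_bfs guarantees every index used is in range,
-- so the .getD 0 default (Python's IndexError) is never taken on admitted inputs.
def pvGet (stairs : List Int) (i : Int) : Int :=
  (PySem.List.pyGet? stairs i).getD 0

-- ===== PORT A =====
structure PyLookUp where
  current : Int
  score : Int
  accum : Int
  strike : Int
deriving Repr, DecidableEq

def nextPlans (l : PyLookUp) (stairs : List Int) : List PyLookUp :=
  let top : Int := (stairs.length : Int) - 1
  if l.current = top then []
  else
    let plans : List PyLookUp :=
      if l.strike + 1 ≠ 3 then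
        [⟨l.current + 1, pvGet stairs (l.current + 1),
          l.accum + pvGet stairs (l.current + 1), l.strike + 1⟩]
      else []
    if l.current + 2 > top then plans
    else
      plans ++ [⟨l.current + 2, pvGet stairs (l.current + 2),
                 l.accum + pvGet stairs (l.current + 2), 1⟩]

-- 'while q:' as fuel recursion; the fuel is a totality guard only, never exhausted under Pre_bfs.
def bfsLoop (stairs : List Int) : Nat → List PyLookUp → Int → Int
  | _, [], m => m
  | 0, _ :: _, m => m
  | fuel+1, l :: q, m =>
    if l.current = (stairs.length : Int) - 1 then
      bfsLoop stairs fuel q (max l.accum m)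
    else
      bfsLoop stairs fuel (q ++ nextPlans l stairs) m

def bfs (start : Int) (stairs : List Int) : Int :=
  bfsLoop stairs (2 ^ (2 * stairs.length + 2))
    [⟨start, pvGet stairs start, pvGet stairs start, 1⟩] 0

-- ===== PORT B =====
-- _omax from Source B
def omaxO (a b : Option Int) : Option Int :=
  match a, b with
  | none, b => b
  | some x, none => some x
  | some x, some y => some (max x y)

-- 'via2' of Source B's loop body: None unless pp holds a reachable state
def via2Of (v : Int) (pp : Option (Option Int × Option Int)) : Option Int :=
  match pp with
  | none => none
  | some q =>
    match omaxO q.1 q.2 with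
    | none => none
    | some m => some (m + v)

-- 'via1' of Source B's loop body
def via1Of (v : Int) (p : Option Int) : Option Int :=
  match p with
  | none => none
  | some x => some (x + v)

-- the body of Source B's for-loop: state = (pp, (p1, p2))
def altStep (stairs : List Int)
    (s : Option (Option Int × Option Int) × (Option Int × Option Int)) (i : Int) :
    Option (Option Int × Option Int) × (Option Int × Option Int) :=
  let v := pvGet stairs i
  (some s.2, (via2Of v s.1, via1Of v s.2.1))

def bfs_alt (start : Int) (stairs : List Int) : Int :=
  let top : Int := (stairs.length : Int) - 1
  let st := (PySem.List.pyRange (start + 1) (top + 1) 1).foldl (altStep stairs)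
    (none, (some (pvGet stairs start), none))
  match omaxO st.2.1 st.2.2 with
  | none => 0
  | some b => max 0 b

-- ===== PRECONDITION & SPEC =====
-- Pre_bfs: exactly the inputs where stairs[start] is in range; A raises IndexError otherwise.
def Pre_bfs (start : Int) (stairs : List Int) : Prop :=
  -(stairs.length : Int) ≤ start ∧ start < (stairs.length : Int)
instance (start : Int) (stairs : List Int) : Decidable (Pre_bfs start stairs) := by
  unfold Pre_bfs; infer_instance

def pvWitness_bfs : Int × List Int := (0, [10, 20, 15, 25, 10, 20])

def Spec_bfs (start : Int) (stairs : List Int) (out : Int) : Prop := out = bfs_alt start stairs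
instance (start : Int) (stairs : List Int) (out : Int) : Decidable (Spec_bfs start stairs out) := by
  unfold Spec_bfs; infer_instance

-- ===== CLAIM (what is proved, stated in full; the proofs are below) =====
def Claim_equal_bfs : Prop := ∀ (start : Int) (stairs : List Int), Dom_bfs start stairs → Pre_bfs start stairs → Spec_bfs start stairs (bfs start stairs)

-- ===== LEMMAS AND PROOFS =====

-- best achievable total over all legal continuations from state (c, accum a, strike s);
-- none = no continuation reaches the top stair.
def hBest (stairs : List Int) (c a s : Int) : Option Int :=
  if c = (stairs.length : Int) - 1 then some a
  else if _h : c < (stairs.length : Int) - 1 then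
    omaxO
      (if s + 1 ≠ 3 then hBest stairs (c + 1) (a + pvGet stairs (c + 1)) (s + 1) else none)
      (if c + 2 ≤ (stairs.length : Int) - 1 then hBest stairs (c + 2) (a + pvGet stairs (c + 2)) 1 else none)
  else none
termination_by ((stairs.length : Int) - 1 - c).toNat
decreasing_by all_goals omega

def omaxD (m : Int) : Option Int → Int
  | none => m
  | some v => max m v

def resQ (stairs : List Int) (q : List PyLookUp) (m : Int) : Int :=
  q.foldl (fun acc l => omaxD acc (hBest stairs l.current l.accum l.strike)) m

def muL (stairs : List Int) (l : PyLookUp) : Nat :=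
  2 ^ (((stairs.length : Int) - 1 - l.current).toNat + 1)

def muQ (stairs : List Int) (q : List PyLookUp) : Nat :=
  (q.map (muL stairs)).sum

theorem omaxO_comm (a b : Option Int) : omaxO a b = omaxO b a := by
  cases a <;> cases b <;> simp [omaxO, max_comm]

theorem omaxO_assoc (a b c : Option Int) : omaxO (omaxO a b) c = omaxO a (omaxO b c) := by
  cases a <;> cases b <;> cases c <;> simp [omaxO, max_assoc]

theorem omaxO_none_right (a : Option Int) : omaxO a none = a := by
  cases a <;> rfl

theorem omaxO_none_left (a : Option Int) : omaxO none a = a := rfl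

theorem omaxD_swap (m : Int) (a b : Option Int) :
    omaxD (omaxD m a) b = omaxD (omaxD m b) a := by
  cases a <;> cases b <;> simp [omaxD, max_right_comm]

theorem omaxD_omaxO (m : Int) (a b : Option Int) :
    omaxD m (omaxO a b) = omaxD (omaxD m a) b := by
  cases a <;> cases b <;> simp [omaxD, omaxO, max_assoc]

theorem resQ_omaxD (stairs : List Int) (q : List PyLookUp) (m : Int) (x : Option Int) :
    resQ stairs q (omaxD m x) = omaxD (resQ stairs q m) x := by
  induction q generalizing m with
  | nil => rfl
  | cons l q ih => simp only [resQ, List.foldl_cons] at *; rw [omaxD_swap, ih]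

theorem hBest_top (stairs : List Int) (a s : Int) :
    hBest stairs ((stairs.length : Int) - 1) a s = some a := by
  rw [hBest]; simp

theorem hBest_lt (stairs : List Int) (c a s : Int) (h : c < (stairs.length : Int) - 1) :
    hBest stairs c a s =
      omaxO
        (if s + 1 ≠ 3 then hBest stairs (c + 1) (a + pvGet stairs (c + 1)) (s + 1) else none)
        (if c + 2 ≤ (stairs.length : Int) - 1 then hBest stairs (c + 2) (a + pvGet stairs (c + 2)) 1 else none) := by
  rw [hBest]; rw [if_neg (by omega), dif_pos h]

theorem plans_res (stairs : List Int) (l : PyLookUp) (a : Int)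
    (h : l.current < (stairs.length : Int) - 1) :
    resQ stairs (nextPlans l stairs) a = omaxD a (hBest stairs l.current l.accum l.strike) := by
  rw [hBest_lt stairs l.current l.accum l.strike h]
  simp only [nextPlans]
  rw [if_neg (show ¬ l.current = (stairs.length : Int) - 1 by omega)]
  by_cases h1 : l.strike + 1 ≠ 3
  · rw [if_pos h1, if_pos h1]
    by_cases h2 : l.current + 2 > (stairs.length : Int) - 1
    · rw [if_pos h2, if_neg (by omega)]
      rw [omaxO_none_right]; rfl
    · rw [if_neg h2, if_pos (by omega)]
      rw [omaxD_omaxO]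
      simp only [resQ, List.foldl_append, List.foldl_cons, List.foldl_nil]
  · rw [if_neg h1, if_neg h1]
    by_cases h2 : l.current + 2 > (stairs.length : Int) - 1
    · rw [if_pos h2, if_neg (by omega)]; rfl
    · rw [if_neg h2, if_pos (by omega)]
      simp only [resQ, List.nil_append, List.foldl_cons, List.foldl_nil, omaxO_none_left]

theorem nextPlans_le (stairs : List Int) (l : PyLookUp)
    (h : l.current < (stairs.length : Int) - 1) :
    ∀ p ∈ nextPlans l stairs, p.current ≤ (stairs.length : Int) - 1 := by
  intro p hp
  simp only [nextPlans] at hp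
  rw [if_neg (show ¬ l.current = (stairs.length : Int) - 1 by omega)] at hp
  split_ifs at hp with h1 h2 h2 <;> simp at hp <;>
    first
    | (rcases hp with hp | hp <;> subst hp <;> simp <;> omega)
    | (subst hp <;> simp <;> omega)

theorem muQ_append (stairs : List Int) (q r : List PyLookUp) :
    muQ stairs (q ++ r) = muQ stairs q + muQ stairs r := by
  simp [muQ]

theorem mu_plans (stairs : List Int) (l : PyLookUp)
    (h : l.current < (stairs.length : Int) - 1) :
    muQ stairs (nextPlans l stairs) + 1 ≤ muL stairs l := by
  simp only [nextPlans]
  rw [if_neg (show ¬ l.current = (stairs.length : Int) - 1 by omega)]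
  have hd1 : 1 ≤ ((stairs.length : Int) - 1 - l.current).toNat := by omega
  by_cases h1 : l.strike + 1 ≠ 3
  · rw [if_pos h1]
    by_cases h2 : l.current + 2 > (stairs.length : Int) - 1
    · -- only the +1 plan
      rw [if_pos h2]
      simp only [muQ, muL, List.map_cons, List.map_nil, List.sum_cons, List.sum_nil]
      obtain ⟨e, he⟩ : ∃ e, ((stairs.length : Int) - 1 - l.current).toNat = e + 1 :=
        ⟨((stairs.length : Int) - 1 - l.current).toNat - 1, by omega⟩
      have e1 : ((stairs.length : Int) - 1 - (l.current + 1)).toNat = e := by omega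
      rw [he, e1]
      have hp : 1 ≤ 2 ^ e := Nat.one_le_two_pow
      have h4 : (2:ℕ) ^ (e + 1 + 1) = 4 * 2 ^ e := by ring
      have h2' : (2:ℕ) ^ (e + 1) = 2 * 2 ^ e := by ring
      omega
    · -- the +1 and +2 plans
      rw [if_neg h2]
      simp only [muQ, muL, List.map_cons, List.map_nil, List.map_append,
        List.sum_cons, List.sum_nil, List.sum_append]
      have hd2 : 2 ≤ ((stairs.length : Int) - 1 - l.current).toNat := by omega
      obtain ⟨e, he⟩ : ∃ e, ((stairs.length : Int) - 1 - l.current).toNat = e + 2 :=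
        ⟨((stairs.length : Int) - 1 - l.current).toNat - 2, by omega⟩
      have e1 : ((stairs.length : Int) - 1 - (l.current + 1)).toNat = e + 1 := by omega
      have e2 : ((stairs.length : Int) - 1 - (l.current + 2)).toNat = e := by omega
      rw [he, e1, e2]
      have hp : 1 ≤ 2 ^ e := Nat.one_le_two_pow
      have h8 : (2:ℕ) ^ (e + 2 + 1) = 8 * 2 ^ e := by ring
      have h4 : (2:ℕ) ^ (e + 1 + 1) = 4 * 2 ^ e := by ring
      have h2' : (2:ℕ) ^ (e + 1) = 2 * 2 ^ e := by ring
      omega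
  · rw [if_neg h1]
    by_cases h2 : l.current + 2 > (stairs.length : Int) - 1
    · -- no plans
      rw [if_pos h2]
      simp only [muQ, muL, List.map_nil, List.sum_nil]
      have hp : 1 ≤ 2 ^ (((stairs.length : Int) - 1 - l.current).toNat + 1) :=
        Nat.one_le_two_pow
      omega
    · -- only the +2 plan
      rw [if_neg h2]
      simp only [muQ, muL, List.nil_append, List.map_cons, List.map_nil,
        List.sum_cons, List.sum_nil]
      have hd2 : 2 ≤ ((stairs.length : Int) - 1 - l.current).toNat := by omega
      obtain ⟨e, he⟩ : ∃ e, ((stairs.length : Int) - 1 - l.current).toNat = e + 2 :=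
        ⟨((stairs.length : Int) - 1 - l.current).toNat - 2, by omega⟩
      have e2 : ((stairs.length : Int) - 1 - (l.current + 2)).toNat = e := by omega
      rw [he, e2]
      have hp : 1 ≤ 2 ^ e := Nat.one_le_two_pow
      have h8 : (2:ℕ) ^ (e + 2 + 1) = 8 * 2 ^ e := by ring
      have h2' : (2:ℕ) ^ (e + 1) = 2 * 2 ^ e := by ring
      omega

theorem bfsLoop_res (stairs : List Int) (fuel : Nat) :
    ∀ (q : List PyLookUp) (m : Int),
      (∀ l ∈ q, l.current ≤ (stairs.length : Int) - 1) →
      muQ stairs q ≤ fuel →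
      bfsLoop stairs fuel q m = resQ stairs q m := by
  induction fuel with
  | zero =>
    intro q m _ hmu
    cases q with
    | nil => rfl
    | cons l q =>
      exfalso
      have h1 : 1 ≤ muL stairs l := Nat.one_le_two_pow
      simp [muQ] at hmu; omega
  | succ fuel ih =>
    intro q m hv hmu
    cases q with
    | nil => rfl
    | cons l q =>
      have hmu' : muL stairs l + muQ stairs q ≤ fuel + 1 := by
        simpa [muQ] using hmu
      have h1 : 1 ≤ muL stairs l := Nat.one_le_two_pow
      by_cases hc : l.current = (stairs.length : Int) - 1
      · rw [bfsLoop, if_pos hc]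
        rw [ih q (max l.accum m) (fun p hp => hv p (List.mem_cons_of_mem _ hp)) (by omega)]
        simp only [resQ, List.foldl_cons]
        rw [hc, hBest_top stairs]
        simp [omaxD, max_comm]
      · have hlt : l.current < (stairs.length : Int) - 1 :=
          lt_of_le_of_ne (hv l List.mem_cons_self) hc
        rw [bfsLoop, if_neg hc]
        have hmuP := mu_plans stairs l hlt
        have hval : ∀ p ∈ q ++ nextPlans l stairs, p.current ≤ (stairs.length : Int) - 1 := by
          intro p hp
          rcases List.mem_append.mp hp with hp | hp
          · exact hv p (List.mem_cons_of_mem _ hp)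
          · exact nextPlans_le stairs l hlt p hp
        have hmuA : muQ stairs (q ++ nextPlans l stairs) ≤ fuel := by
          rw [muQ_append]; omega
        rw [ih _ m hval hmuA]
        simp only [resQ, List.foldl_cons]
        show resQ stairs (q ++ nextPlans l stairs) m
            = resQ stairs q (omaxD m (hBest stairs l.current l.accum l.strike))
        rw [resQ_omaxD, resQ, List.foldl_append]
        show resQ stairs (nextPlans l stairs) (resQ stairs q m) = _
        rw [plans_res stairs l _ hlt]

-- ===== B side =====

theorem map_add_omaxO (a : Int) (x y : Option Int) :
    (omaxO x y).map (a + ·) = omaxO (x.map (a + ·)) (y.map (a + ·)) := by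
  cases x <;> cases y <;> simp [omaxO, max_add_add_left]

theorem hBest_shift (stairs : List Int) (c a s : Int) :
    hBest stairs c a s = (hBest stairs c 0 s).map (a + ·) := by
  by_cases h0 : c = (stairs.length : Int) - 1
  · rw [h0, hBest_top, hBest_top]; simp
  · by_cases h1 : c < (stairs.length : Int) - 1
    · rw [hBest_lt stairs c a s h1, hBest_lt stairs c 0 s h1]
      rw [hBest_shift stairs (c + 1) (a + pvGet stairs (c + 1)) (s + 1),
          hBest_shift stairs (c + 1) (0 + pvGet stairs (c + 1)) (s + 1),
          hBest_shift stairs (c + 2) (a + pvGet stairs (c + 2)) 1,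
          hBest_shift stairs (c + 2) (0 + pvGet stairs (c + 2)) 1]
      rw [map_add_omaxO]
      congr 1
      · split_ifs with hs
        · rw [Option.map_map]; congr 1; funext x; simp; ring
        · rfl
      · split_ifs with hs
        · rw [Option.map_map]; congr 1; funext x; simp; ring
        · rfl
    · have hA : hBest stairs c a s = none := by
        rw [hBest, if_neg h0, dif_neg h1]
      have hB : hBest stairs c 0 s = none := by
        rw [hBest, if_neg h0, dif_neg h1]
      rw [hA, hB]; rfl
termination_by ((stairs.length : Int) - 1 - c).toNat
decreasing_by all_goals omega

def combO (x f : Option Int) : Option Int :=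
  match x, f with
  | some x, some y => some (x + y)
  | _, _ => none

theorem comb_shift (x F : Option Int) (v : Int) :
    combO (x.map (· + v)) F = combO x (F.map (v + ·)) := by
  cases x <;> cases F <;> simp [combO] <;> ring

theorem comb_omax_right (x F G : Option Int) :
    combO x (omaxO F G) = omaxO (combO x F) (combO x G) := by
  cases x <;> cases F <;> cases G <;> simp [combO, omaxO, max_add_add_left]

theorem comb_omax_left (x y F : Option Int) :
    combO (omaxO x y) F = omaxO (combO x F) (combO y F) := by
  cases x <;> cases y <;> cases F <;> simp [combO, omaxO, max_add_add_right]

def jumpO (stairs : List Int) (i : Int) : Option Int :=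
  if i + 1 ≤ (stairs.length : Int) - 1 then
    (hBest stairs (i + 1) 0 1).map (pvGet stairs (i + 1) + ·)
  else none

def ppQ (pp : Option (Option Int × Option Int)) : Option Int :=
  match pp with
  | none => none
  | some q => omaxO q.1 q.2

def totO (stairs : List Int) (i : Int)
    (st : Option (Option Int × Option Int) × (Option Int × Option Int)) : Option Int :=
  omaxO
    (omaxO (combO st.2.1 (hBest stairs i 0 1)) (combO st.2.2 (hBest stairs i 0 2)))
    (combO (ppQ st.1) (jumpO stairs i))

theorem via2Of_eq (v : Int) (pp : Option (Option Int × Option Int)) :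
    via2Of v pp = (ppQ pp).map (· + v) := by
  cases pp with
  | none => rfl
  | some q =>
    cases h : omaxO q.1 q.2 <;> simp [via2Of, ppQ, h]

theorem via1Of_eq (v : Int) (p : Option Int) :
    via1Of v p = p.map (· + v) := by
  cases p <;> rfl

theorem omax_shuffle (A B C QX : Option Int) :
    omaxO (omaxO QX A) (omaxO B C) = omaxO (omaxO (omaxO A B) C) QX := by
  rw [omaxO_assoc QX A (omaxO B C), omaxO_comm QX (omaxO A (omaxO B C))]
  congr 1
  rw [omaxO_assoc]

theorem tot_step_alg (v : Int) (X Y J Q p1 p2 : Option Int) :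
    omaxO (omaxO (combO (Q.map (· + v)) X) (combO (p1.map (· + v)) Y))
      (combO (omaxO p1 p2) J)
    = omaxO (omaxO (combO p1 (omaxO (Y.map (v + ·)) J)) (combO p2 J))
      (combO Q (X.map (v + ·))) := by
  rw [comb_shift Q X v, comb_shift p1 Y v, comb_omax_left p1 p2 J, comb_omax_right p1]
  exact omax_shuffle _ _ _ _

theorem step_pres (stairs : List Int) (i : Int) (hi : i < (stairs.length : Int) - 1)
    (st : Option (Option Int × Option Int) × (Option Int × Option Int)) :
    totO stairs (i + 1) (altStep stairs st (i + 1)) = totO stairs i st := by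
  obtain ⟨pp, p1, p2⟩ := st
  have h2 : i + 1 + 1 = i + 2 := by ring
  have hF1 : hBest stairs i 0 1
      = omaxO ((hBest stairs (i + 1) 0 2).map (pvGet stairs (i + 1) + ·))
          (jumpO stairs (i + 1)) := by
    rw [hBest_lt stairs i 0 1 hi]
    rw [if_pos (by norm_num : ¬ (1 : Int) + 1 = 3)]
    congr 1
    · rw [hBest_shift stairs (i + 1) (0 + pvGet stairs (i + 1)) (1 + 1)]
      rw [show (1 : Int) + 1 = 2 by norm_num]
      congr 1; funext x; ring
    · rw [jumpO, h2]
      split_ifs with h3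
      · rw [hBest_shift stairs (i + 2) (0 + pvGet stairs (i + 2)) 1]
        congr 1; funext x; ring
      · rfl
  have hF2 : hBest stairs i 0 2 = jumpO stairs (i + 1) := by
    rw [hBest_lt stairs i 0 2 hi]
    rw [if_neg (by norm_num : ¬ ¬ (2 : Int) + 1 = 3), omaxO_none_left, jumpO, h2]
    split_ifs with h3
    · rw [hBest_shift stairs (i + 2) (0 + pvGet stairs (i + 2)) 1]
      congr 1; funext x; ring
    · rfl
  have hJi : jumpO stairs i
      = (hBest stairs (i + 1) 0 1).map (pvGet stairs (i + 1) + ·) := by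
    rw [jumpO, if_pos (by omega)]
  show totO stairs (i + 1)
      (some (p1, p2), (via2Of (pvGet stairs (i + 1)) pp, via1Of (pvGet stairs (i + 1)) p1))
      = totO stairs i (pp, p1, p2)
  simp only [totO, via2Of_eq, via1Of_eq, ppQ]
  rw [hF1, hF2, hJi]
  exact tot_step_alg (pvGet stairs (i + 1)) (hBest stairs (i + 1) 0 1)
    (hBest stairs (i + 1) 0 2) (jumpO stairs (i + 1)) (ppQ pp) p1 p2

theorem fold_tot (stairs : List Int) (n : Nat) :
    ∀ (i : Int), i ≤ (stairs.length : Int) - 1 →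
      ((stairs.length : Int) - 1 - i).toNat = n →
      ∀ st, totO stairs ((stairs.length : Int) - 1)
        ((PySem.List.pyRange (i + 1) ((stairs.length : Int) - 1 + 1) 1).foldl (altStep stairs) st)
        = totO stairs i st := by
  induction n with
  | zero =>
    intro i hi hn st
    have : i = (stairs.length : Int) - 1 := by omega
    subst this
    rw [PySem.List.pyRange_one_eq_nil (by omega)]
    rfl
  | succ n ih =>
    intro i hi hn st
    have hlt : i < (stairs.length : Int) - 1 := by omega
    rw [PySem.List.pyRange_one_cons (by omega)]
    rw [List.foldl_cons]
    rw [ih (i + 1) (by omega) (by omega)]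
    exact step_pres stairs i hlt st

theorem tot_top (stairs : List Int)
    (st : Option (Option Int × Option Int) × (Option Int × Option Int)) :
    totO stairs ((stairs.length : Int) - 1) st = omaxO st.2.1 st.2.2 := by
  unfold totO jumpO
  rw [hBest_top stairs, hBest_top stairs, if_neg (by omega)]
  cases h1 : st.2.1 <;> cases h2 : st.2.2 <;> cases h3 : st.1 <;> simp [combO, omaxO, ppQ]

-- ===== VERDICT (by name: the statement is the Claim_ definition above) =====
theorem bfs_spec : Claim_equal_bfs := by
  intro start stairs _hdom hpre
  obtain ⟨h1, h2⟩ := hpre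
  unfold Spec_bfs
  have htop : start ≤ (stairs.length : Int) - 1 := by omega
  -- A side
  have hA : bfs start stairs
      = omaxD 0 (hBest stairs start (pvGet stairs start) 1) := by
    unfold bfs
    rw [bfsLoop_res stairs _ _ 0 (by intro l hl; simp at hl; subst hl; exact htop)
      (by
        simp only [muQ, muL, List.map, List.sum_cons, List.sum_nil]
        have he : ((stairs.length : Int) - 1 - start).toNat + 1 ≤ 2 * stairs.length + 2 := by
          omega
        have := Nat.pow_le_pow_right (show 1 ≤ 2 by norm_num) he
        omega)]
    rfl
  -- B side
  have hB : bfs_alt start stairs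
      = omaxD 0 (hBest stairs start (pvGet stairs start) 1) := by
    unfold bfs_alt
    dsimp only
    have hfold := fold_tot stairs (((stairs.length : Int) - 1 - start).toNat) start htop rfl
      (none, (some (pvGet stairs start), none))
    rw [tot_top] at hfold
    rw [hfold]
    have heq : totO stairs start (none, (some (pvGet stairs start), none))
        = hBest stairs start (pvGet stairs start) 1 := by
      rw [hBest_shift stairs start (pvGet stairs start) 1]
      unfold totO
      cases hBest stairs start 0 1 <;> simp [ppQ, combO, omaxO]
    rw [heq]
    cases hBest stairs start (pvGet stairs start) 1 <;> rfl
  rw [hA, hB]
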